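-- pv_equiv track=rewrite | github.com/Sancheslipe/atividades_python_basico_ao_avancado_secao_08 | ex50.py | soma_diagonal_principal
-- ===== SOURCE A (Python) =====
-- def soma_diagonal_principal(matriz):
--     soma = 0
--     for l in range(0,3):
--         for c in range(0,3):
--             if (l == 0 and c  == 0) :
--                 soma += matriz[l][c]
--
--             elif l == 1 and c == 1:
--                 soma += matriz[l][c]
--
--             elif l == 2 and c == 2:
--                 soma += matriz[l][c]
--
--
--     return soma
-- ===== SOURCE B (Python) =====
-- def soma_diagonal_principal(matriz):
--     soma = 0
--     for i in range(3):
--         soma += matriz[i][i]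
--     return soma
-- ===== Notes on version B (the rewrite author's own statement) =====
-- stated objective: simpler
-- what changed: Replaces the 3x3 nested loop with three equality-tested branches by a single loop over one index i accumulating matriz[i][i], visiting only the three diagonal cells.
import Mathlib
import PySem

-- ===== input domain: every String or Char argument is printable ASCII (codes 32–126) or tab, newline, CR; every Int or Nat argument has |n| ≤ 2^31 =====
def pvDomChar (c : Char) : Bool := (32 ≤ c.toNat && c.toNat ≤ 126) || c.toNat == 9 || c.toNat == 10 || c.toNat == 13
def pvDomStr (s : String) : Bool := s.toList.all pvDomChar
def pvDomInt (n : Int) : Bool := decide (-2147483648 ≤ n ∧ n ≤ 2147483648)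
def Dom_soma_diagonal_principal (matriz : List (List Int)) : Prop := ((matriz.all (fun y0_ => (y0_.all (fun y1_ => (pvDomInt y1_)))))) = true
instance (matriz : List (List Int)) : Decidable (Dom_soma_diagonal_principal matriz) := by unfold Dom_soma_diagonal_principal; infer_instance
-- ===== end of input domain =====

-- ===== PORT A =====
-- literal port of A: nested loops over range(0,3) with the three branch tests;
-- matriz[l][c] is pyGetD under Pre_ (in range there, so exact)
def soma_diagonal_principal (matriz : List (List Int)) : Int :=
  (PySem.List.pyRange 0 3 1).foldl (fun soma l =>
    (PySem.List.pyRange 0 3 1).foldl (fun soma c =>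
      if l = 0 ∧ c = 0 then soma + PySem.List.pyGetD (PySem.List.pyGetD matriz l []) c 0
      else if l = 1 ∧ c = 1 then soma + PySem.List.pyGetD (PySem.List.pyGetD matriz l []) c 0
      else if l = 2 ∧ c = 2 then soma + PySem.List.pyGetD (PySem.List.pyGetD matriz l []) c 0
      else soma) soma) 0

-- ===== PORT B =====
-- port of B: single loop over range(3) accumulating matriz[i][i]
def soma_diagonal_principal_alt (matriz : List (List Int)) : Int :=
  (PySem.List.pyRange 0 3 1).foldl (fun soma i =>
    soma + PySem.List.pyGetD (PySem.List.pyGetD matriz i []) i 0) 0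

-- ===== PRECONDITION & SPEC =====
-- A indexes matriz[l][l] for l = 0,1,2 (off-diagonal iterations fall through all
-- branches), so it raises IndexError unless there are at least 3 rows and row l
-- has more than l entries; Pre_ is exactly that.
def Pre_soma_diagonal_principal (matriz : List (List Int)) : Prop :=
  3 ≤ matriz.length ∧ 1 ≤ (matriz.getD 0 []).length ∧ 2 ≤ (matriz.getD 1 []).length ∧ 3 ≤ (matriz.getD 2 []).length
instance (matriz : List (List Int)) : Decidable (Pre_soma_diagonal_principal matriz) := by unfold Pre_soma_diagonal_principal; infer_instance
def pvWitness_soma_diagonal_principal : List (List Int) := [[1,2,3],[4,5,6],[7,8,9]]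
def Spec_soma_diagonal_principal (matriz : List (List Int)) (out : Int) : Prop := out = soma_diagonal_principal_alt matriz
instance (matriz : List (List Int)) (out : Int) : Decidable (Spec_soma_diagonal_principal matriz out) := by unfold Spec_soma_diagonal_principal; infer_instance

-- ===== CLAIM (what is proved, stated in full; the proofs are below) =====
def Claim_equal_soma_diagonal_principal : Prop := ∀ (matriz : List (List Int)), Dom_soma_diagonal_principal matriz → Pre_soma_diagonal_principal matriz → Spec_soma_diagonal_principal matriz (soma_diagonal_principal matriz)

-- ===== LEMMAS AND PROOFS =====

-- ===== VERDICT (by name: the statement is the Claim_ definition above) =====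
theorem soma_diagonal_principal_spec : Claim_equal_soma_diagonal_principal := by
  intro matriz _ _
  unfold Spec_soma_diagonal_principal soma_diagonal_principal soma_diagonal_principal_alt
  simp [show PySem.List.pyRange 0 3 1 = [0,1,2] by decide, List.foldl]
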